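-- pv_equiv track=rewrite | github.com/molnart314/ECOPY_23241 | src/weekly/weekly_test_1.py | sort_list_by_divisibility
-- ===== SOURCE A (Python) =====
-- def sort_list_by_divisibility(input_list):
--     result_dict = {
--         'by_two': [],
--         'by_five': [],
--         'by_two_and_five': [],
--         'by_none': []
--     }
--
--     for num in input_list:
--         if num % 2 == 0 and num % 5 == 0:
--             result_dict['by_two_and_five'].append(num)
--         elif num % 2 == 0:
--             result_dict['by_two'].append(num)
--         elif num % 5 == 0:
--             result_dict['by_five'].append(num)
--         else:
--             result_dict['by_none'].append(num)
--
--     return result_dict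
-- ===== SOURCE B (Python) =====
-- def sort_list_by_divisibility(input_list):
--     return {
--         'by_two': [n for n in input_list if n % 2 == 0 and n % 5 != 0],
--         'by_five': [n for n in input_list if n % 2 != 0 and n % 5 == 0],
--         'by_two_and_five': [n for n in input_list if n % 2 == 0 and n % 5 == 0],
--         'by_none': [n for n in input_list if n % 2 != 0 and n % 5 != 0],
--     }
-- ===== Notes on version B (the rewrite author's own statement) =====
-- stated objective: idiomatic
-- what changed: Replaces the single pass with a mutable four-bucket dict and an if/elif chain by four independent order-preserving filter comprehensions, one per bucket.
import Mathlib
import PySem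

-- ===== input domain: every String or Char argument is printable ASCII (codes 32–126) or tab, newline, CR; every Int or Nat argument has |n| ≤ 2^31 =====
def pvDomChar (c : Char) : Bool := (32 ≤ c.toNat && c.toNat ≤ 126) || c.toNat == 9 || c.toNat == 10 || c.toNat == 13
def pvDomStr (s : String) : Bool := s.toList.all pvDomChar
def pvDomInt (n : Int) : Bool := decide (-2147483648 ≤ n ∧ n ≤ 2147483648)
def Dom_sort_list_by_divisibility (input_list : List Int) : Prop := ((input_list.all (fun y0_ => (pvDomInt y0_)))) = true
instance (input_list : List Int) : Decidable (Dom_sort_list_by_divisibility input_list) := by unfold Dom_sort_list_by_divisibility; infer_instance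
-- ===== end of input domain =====

-- B replaces A's single pass with a mutable four-bucket dict by four independent filter passes, one per bucket (idiomatic; return value only).

-- ===== PORT A =====
-- literal port of A: build the four-entry dict, then one loop with the if/elif chain appending to the right bucket
def sort_list_by_divisibility (input_list : List Int) : List (String × List Int) :=
  (input_list.foldl (fun (d : PySem.Dict String (List Int)) num =>
      if PySem.Int.mod num 2 == 0 && PySem.Int.mod num 5 == 0 then
        d.modify "by_two_and_five" [] (· ++ [num])
      else if PySem.Int.mod num 2 == 0 then
        d.modify "by_two" [] (· ++ [num])
      else if PySem.Int.mod num 5 == 0 then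
        d.modify "by_five" [] (· ++ [num])
      else
        d.modify "by_none" [] (· ++ [num]))
    (PySem.Dict.ofList [("by_two", []), ("by_five", []), ("by_two_and_five", []), ("by_none", [])])).items

-- ===== PORT B =====
-- literal port of B: four order-preserving filters
def sort_list_by_divisibility_alt (input_list : List Int) : List (String × List Int) :=
  [ ("by_two", input_list.filter (fun n => PySem.Int.mod n 2 == 0 && PySem.Int.mod n 5 != 0)),
    ("by_five", input_list.filter (fun n => PySem.Int.mod n 2 != 0 && PySem.Int.mod n 5 == 0)),
    ("by_two_and_five", input_list.filter (fun n => PySem.Int.mod n 2 == 0 && PySem.Int.mod n 5 == 0)),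
    ("by_none", input_list.filter (fun n => PySem.Int.mod n 2 != 0 && PySem.Int.mod n 5 != 0)) ]

-- ===== PRECONDITION & SPEC =====
def Spec_sort_list_by_divisibility (input_list : List Int) (out : List (String × List Int)) : Prop := out = sort_list_by_divisibility_alt input_list
instance (input_list : List Int) (out : List (String × List Int)) : Decidable (Spec_sort_list_by_divisibility input_list out) := by unfold Spec_sort_list_by_divisibility; infer_instance

-- ===== CLAIM (what is proved, stated in full; the proofs are below) =====
def Claim_equal_sort_list_by_divisibility : Prop := ∀ (input_list : List Int), Dom_sort_list_by_divisibility input_list → Spec_sort_list_by_divisibility input_list (sort_list_by_divisibility input_list)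

-- ===== LEMMAS AND PROOFS =====

-- how 'modify' acts on the concrete four-entry dict (one lemma per bucket)
theorem sldb_mod_two (t f tf no : List Int) (v : Int) :
    (PySem.Dict.mk [("by_two", t), ("by_five", f), ("by_two_and_five", tf), ("by_none", no)]).modify "by_two" [] (· ++ [v]) =
    PySem.Dict.mk [("by_two", t ++ [v]), ("by_five", f), ("by_two_and_five", tf), ("by_none", no)] := by
  simp [PySem.Dict.modify, PySem.Dict.getD, PySem.Dict.get?, PySem.Dict.insert, PySem.Dict.contains]

theorem sldb_mod_five (t f tf no : List Int) (v : Int) :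
    (PySem.Dict.mk [("by_two", t), ("by_five", f), ("by_two_and_five", tf), ("by_none", no)]).modify "by_five" [] (· ++ [v]) =
    PySem.Dict.mk [("by_two", t), ("by_five", f ++ [v]), ("by_two_and_five", tf), ("by_none", no)] := by
  simp [PySem.Dict.modify, PySem.Dict.getD, PySem.Dict.get?, PySem.Dict.insert, PySem.Dict.contains]

theorem sldb_mod_tf (t f tf no : List Int) (v : Int) :
    (PySem.Dict.mk [("by_two", t), ("by_five", f), ("by_two_and_five", tf), ("by_none", no)]).modify "by_two_and_five" [] (· ++ [v]) =
    PySem.Dict.mk [("by_two", t), ("by_five", f), ("by_two_and_five", tf ++ [v]), ("by_none", no)] := by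
  simp [PySem.Dict.modify, PySem.Dict.getD, PySem.Dict.get?, PySem.Dict.insert, PySem.Dict.contains]

theorem sldb_mod_none (t f tf no : List Int) (v : Int) :
    (PySem.Dict.mk [("by_two", t), ("by_five", f), ("by_two_and_five", tf), ("by_none", no)]).modify "by_none" [] (· ++ [v]) =
    PySem.Dict.mk [("by_two", t), ("by_five", f), ("by_two_and_five", tf), ("by_none", no ++ [v])] := by
  simp [PySem.Dict.modify, PySem.Dict.getD, PySem.Dict.get?, PySem.Dict.insert, PySem.Dict.contains]

-- loop invariant: starting from a four-bucket dict with arbitrary contents, A's fold appends exactly the filtered elements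
theorem sldb_fold_inv (l : List Int) (t f tf no : List Int) :
    (l.foldl (fun (d : PySem.Dict String (List Int)) num =>
      if PySem.Int.mod num 2 == 0 && PySem.Int.mod num 5 == 0 then
        d.modify "by_two_and_five" [] (· ++ [num])
      else if PySem.Int.mod num 2 == 0 then
        d.modify "by_two" [] (· ++ [num])
      else if PySem.Int.mod num 5 == 0 then
        d.modify "by_five" [] (· ++ [num])
      else
        d.modify "by_none" [] (· ++ [num]))
      (PySem.Dict.mk [("by_two", t), ("by_five", f), ("by_two_and_five", tf), ("by_none", no)])) =
    PySem.Dict.mk [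
      ("by_two", t ++ l.filter (fun n => PySem.Int.mod n 2 == 0 && PySem.Int.mod n 5 != 0)),
      ("by_five", f ++ l.filter (fun n => PySem.Int.mod n 2 != 0 && PySem.Int.mod n 5 == 0)),
      ("by_two_and_five", tf ++ l.filter (fun n => PySem.Int.mod n 2 == 0 && PySem.Int.mod n 5 == 0)),
      ("by_none", no ++ l.filter (fun n => PySem.Int.mod n 2 != 0 && PySem.Int.mod n 5 != 0))] := by
  induction l generalizing t f tf no with
  | nil => simp
  | cons x xs ih =>
    rw [List.foldl_cons, List.filter_cons, List.filter_cons, List.filter_cons, List.filter_cons]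
    by_cases h2 : PySem.Int.mod x 2 == 0 <;> by_cases h5 : PySem.Int.mod x 5 == 0
    · rw [if_pos (by rw [h2, h5]; rfl), sldb_mod_tf, ih]
      simp [h2, h5]
      rw [show PySem.Int.mod x 2 = x % 2 from PySem.Int.mod_eq_emod_of_pos (by norm_num)] at h2
      rw [show PySem.Int.mod x 5 = x % 5 from PySem.Int.mod_eq_emod_of_pos (by norm_num)] at h5
      simp at h2 h5
      omega
    · rw [if_neg (by rw [h2, Bool.eq_false_iff.mpr h5]; simp), if_pos h2, sldb_mod_two, ih]
      simp [h2, Bool.eq_false_iff.mpr h5]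
      rw [show PySem.Int.mod x 2 = x % 2 from PySem.Int.mod_eq_emod_of_pos (by norm_num)] at h2
      rw [show PySem.Int.mod x 5 = x % 5 from PySem.Int.mod_eq_emod_of_pos (by norm_num)] at h5
      simp at h2 h5
      omega
    · rw [if_neg (by rw [Bool.eq_false_iff.mpr h2]; simp), if_neg h2, if_pos h5, sldb_mod_five, ih]
      simp [Bool.eq_false_iff.mpr h2, h5]
      rw [show PySem.Int.mod x 2 = x % 2 from PySem.Int.mod_eq_emod_of_pos (by norm_num)] at h2
      rw [show PySem.Int.mod x 5 = x % 5 from PySem.Int.mod_eq_emod_of_pos (by norm_num)] at h5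
      simp at h2 h5
      omega
    · rw [if_neg (by rw [Bool.eq_false_iff.mpr h2]; simp), if_neg h2, if_neg h5, sldb_mod_none, ih]
      simp [Bool.eq_false_iff.mpr h2, Bool.eq_false_iff.mpr h5]
      rw [show PySem.Int.mod x 2 = x % 2 from PySem.Int.mod_eq_emod_of_pos (by norm_num)] at h2
      rw [show PySem.Int.mod x 5 = x % 5 from PySem.Int.mod_eq_emod_of_pos (by norm_num)] at h5
      simp at h2 h5
      omega

-- ===== VERDICT (by name: the statement is the Claim_ definition above) =====
theorem sort_list_by_divisibility_spec : Claim_equal_sort_list_by_divisibility := by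
  intro input_list _
  show _ = _
  unfold sort_list_by_divisibility sort_list_by_divisibility_alt
  rw [show (PySem.Dict.ofList [("by_two", ([] : List Int)), ("by_five", []), ("by_two_and_five", []), ("by_none", [])]) =
      PySem.Dict.mk [("by_two", []), ("by_five", []), ("by_two_and_five", []), ("by_none", [])] from by decide]
  rw [sldb_fold_inv]
  simp
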